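-- pv_equiv track=rewrite | github.com/armandiB/Foundation-TS-Retrocast | Financial/utils.py | generate_fcd_idxs
-- ===== SOURCE A (Python) =====
-- def generate_fcd_idxs(fcds_list, index_list):
--     fcds = []
--     fcds_list_current_idx = 0
--     for i, date in enumerate(index_list):
--         if fcds_list_current_idx < len(fcds_list):
--             current_fcd = fcds_list[fcds_list_current_idx]
--         else:
--             break
--         if date >= current_fcd:
--             fcds += [i]
--             fcds_list_current_idx += 1
--
--     return fcds
-- ===== SOURCE B (Python) =====
-- def generate_fcd_idxs(fcds_list, index_list):
--     # Divide-and-conquer over index_list: each half is solved recursively,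
--     # threading the count of already-matched fcds from left to right.
--     def solve(lo, hi, k):
--         if k >= len(fcds_list) or lo >= hi:
--             return [], k
--         if hi - lo == 1:
--             if index_list[lo] >= fcds_list[k]:
--                 return [lo], k + 1
--             return [], k
--         mid = (lo + hi) // 2
--         left, k = solve(lo, mid, k)
--         right, k = solve(mid, hi, k)
--         return left + right, k
--
--     out, _ = solve(0, len(index_list), 0)
--     return out
-- ===== Notes on version B (the rewrite author's own statement) =====
-- stated objective: alternative
-- what changed: A runs one flat left-to-right loop over index_list with a pointer into fcds_list; B solves the problem by divide-and-conquer on index ranges: it splits the range in half, solves each half recursively (threading the matched-fcd count from the left half into the right) and concatenates the results.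
import Mathlib
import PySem

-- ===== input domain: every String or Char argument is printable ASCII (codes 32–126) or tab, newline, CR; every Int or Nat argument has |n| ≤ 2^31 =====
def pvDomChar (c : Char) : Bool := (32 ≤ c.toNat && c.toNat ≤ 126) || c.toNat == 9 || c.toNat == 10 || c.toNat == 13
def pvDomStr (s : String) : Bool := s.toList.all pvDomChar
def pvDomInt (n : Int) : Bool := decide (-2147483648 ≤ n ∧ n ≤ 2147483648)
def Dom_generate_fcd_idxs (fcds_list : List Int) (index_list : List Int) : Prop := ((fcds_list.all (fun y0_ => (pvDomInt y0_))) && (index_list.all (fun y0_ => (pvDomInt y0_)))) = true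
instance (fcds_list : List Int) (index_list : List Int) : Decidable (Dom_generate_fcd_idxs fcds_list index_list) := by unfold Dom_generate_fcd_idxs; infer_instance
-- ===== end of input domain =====

-- B replaces A's flat left-to-right loop by a divide-and-conquer over index ranges,
-- threading the matched-fcd count from the left half into the right (objective:
-- alternative algorithmic decomposition, same cost).

-- ===== PORT A =====
-- A's for-loop over enumerate(index_list): state = (i, fcds_list_current_idx, fcds);
-- the `break` when the pointer runs off fcds_list is the `else fcds` branch.
def genA_loop (fcds_list : List Int) : List Int → Int → Nat → List Int → List Int
  | [], _, _, fcds => fcds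
  | date :: rest, i, cur, fcds =>
    if h : cur < fcds_list.length then
      let current_fcd := fcds_list[cur]
      if date ≥ current_fcd then
        genA_loop fcds_list rest (i + 1) (cur + 1) (fcds ++ [i])
      else
        genA_loop fcds_list rest (i + 1) cur fcds
    else fcds

def generate_fcd_idxs (fcds_list : List Int) (index_list : List Int) : List Int :=
  genA_loop fcds_list index_list 0 0 []

-- ===== PORT B =====
-- `solve(lo, hi, k)` from Source B; index accesses index_list[lo]/fcds_list[k] are in
-- range whenever hi ≤ index_list.length and the leaf guard passed, so getD is exact there.
-- termination facts for the halving recursion (named so no tactic proof term sits inside the definition)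
theorem pv_half_lt_left (lo hi k n : Nat) (h1 : ¬(k ≥ n ∨ lo ≥ hi)) (h2 : ¬(hi - lo = 1)) :
    (lo + hi) / 2 - lo < hi - lo := by omega

theorem pv_half_lt_right (lo hi k n : Nat) (h1 : ¬(k ≥ n ∨ lo ≥ hi)) (h2 : ¬(hi - lo = 1)) :
    hi - (lo + hi) / 2 < hi - lo := by omega

def genB_solve (fcds_list index_list : List Int) (lo hi k : Nat) : List Int × Nat :=
  if hguard : k ≥ fcds_list.length ∨ lo ≥ hi then ([], k)
  else if hone : hi - lo = 1 then
    if index_list.getD lo 0 ≥ fcds_list.getD k 0 then ([(lo : Int)], k + 1) else ([], k)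
  else
    let mid := (lo + hi) / 2
    let p := genB_solve fcds_list index_list lo mid k
    let q := genB_solve fcds_list index_list mid hi p.2
    (p.1 ++ q.1, q.2)
termination_by hi - lo
decreasing_by
  all_goals first
    | exact pv_half_lt_left lo hi k fcds_list.length hguard hone
    | exact pv_half_lt_right lo hi k fcds_list.length hguard hone

def generate_fcd_idxs_alt (fcds_list : List Int) (index_list : List Int) : List Int :=
  (genB_solve fcds_list index_list 0 index_list.length 0).1

-- ===== PRECONDITION & SPEC =====
def Spec_generate_fcd_idxs (fcds_list : List Int) (index_list : List Int) (out : List Int) : Prop := out = generate_fcd_idxs_alt fcds_list index_list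
instance (fcds_list : List Int) (index_list : List Int) (out : List Int) : Decidable (Spec_generate_fcd_idxs fcds_list index_list out) := by unfold Spec_generate_fcd_idxs; infer_instance

-- ===== CLAIM (what is proved, stated in full; the proofs are below) =====
def Claim_equal_generate_fcd_idxs : Prop := ∀ (fcds_list : List Int) (index_list : List Int), Dom_generate_fcd_idxs fcds_list index_list → Spec_generate_fcd_idxs fcds_list index_list (generate_fcd_idxs fcds_list index_list)

-- ===== LEMMAS AND PROOFS =====

-- sequential reference scan both programs are reduced to: returns (matches, final pointer)
def pvScan (fcds : List Int) : List Int → Int → Nat → List Int × Nat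
  | [], _, k => ([], k)
  | d :: ds, i, k =>
    if h : k < fcds.length then
      if d ≥ fcds[k] then
        let p := pvScan fcds ds (i + 1) (k + 1); (i :: p.1, p.2)
      else pvScan fcds ds (i + 1) k
    else ([], k)

theorem pvScan_exhaust (fcds ds : List Int) (i : Int) (k : Nat)
    (h : fcds.length ≤ k) : pvScan fcds ds i k = ([], k) := by
  cases ds with
  | nil => rfl
  | cons d ds => simp [pvScan, show ¬ k < fcds.length by omega]

theorem pvScan_append (fcds : List Int) (xs : List Int) :
    ∀ (ys : List Int) (i : Int) (k : Nat),
      pvScan fcds (xs ++ ys) i k =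
        (((pvScan fcds xs i k).1 ++ (pvScan fcds ys (i + xs.length) (pvScan fcds xs i k).2).1),
         (pvScan fcds ys (i + xs.length) (pvScan fcds xs i k).2).2) := by
  induction xs with
  | nil => intro ys i k; simp [pvScan]
  | cons d ds ih =>
    intro ys i k
    by_cases h : k < fcds.length
    · by_cases hge : d ≥ fcds[k]
      · simp only [List.cons_append, pvScan, dif_pos h, if_pos hge, ih]
        rw [show (i + 1 + (ds.length : Int)) = i + (((ds.length + 1 : Nat)) : Int) by push_cast; ring]
        simp
      · simp only [List.cons_append, pvScan, dif_pos h, if_neg hge, ih]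
        rw [show (i + 1 + (ds.length : Int)) = i + (((ds.length + 1 : Nat)) : Int) by push_cast; ring]
        simp
    · simp only [List.cons_append, pvScan, dif_neg h]
      rw [pvScan_exhaust fcds ys _ k (by omega)]
      simp
  
theorem genA_loop_eq_scan (fcds : List Int) :
    ∀ (il : List Int) (i : Int) (cur : Nat) (acc : List Int),
      genA_loop fcds il i cur acc = acc ++ (pvScan fcds il i cur).1 := by
  intro il
  induction il with
  | nil => intro i cur acc; simp [genA_loop, pvScan]
  | cons d ds ih =>
    intro i cur acc
    by_cases h : cur < fcds.length
    · by_cases hge : d ≥ fcds[cur]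
      · simp only [genA_loop, dif_pos h, if_pos hge, pvScan, ih]
        simp
      · simp only [genA_loop, dif_pos h, if_neg hge, pvScan, ih]
    · simp [genA_loop, dif_neg h, pvScan]

theorem genB_solve_eq_scan (fcds il : List Int) :
    ∀ (n lo hi k : Nat), hi - lo = n → lo ≤ hi → hi ≤ il.length →
      genB_solve fcds il lo hi k = pvScan fcds ((il.drop lo).take (hi - lo)) (lo : Int) k := by
  intro n
  induction n using Nat.strong_induction_on with
  | _ n ih =>
  intro lo hi k hn hle hhi
  by_cases hk : k ≥ fcds.length
  · rw [genB_solve, dif_pos (Or.inl hk), pvScan_exhaust _ _ _ _ hk]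
  by_cases htriv : lo ≥ hi
  · rw [genB_solve, dif_pos (Or.inr htriv)]
    have : hi - lo = 0 := by omega
    simp [this, pvScan]
  by_cases hone : hi - lo = 1
  · have hlt : lo < il.length := by omega
    have hslice : (il.drop lo).take (hi - lo) = [il[lo]] := by
      rw [hone, List.drop_eq_getElem_cons hlt, List.take_succ_cons, List.take_zero]
    rw [genB_solve, dif_neg (by push Not; exact ⟨by omega, by omega⟩), dif_pos hone, hslice]
    have hget : il[lo]? = some il[lo] := List.getElem?_eq_getElem hlt
    by_cases hge : il[lo] ≥ fcds[k]'(by omega)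
    · simp [pvScan, show k < fcds.length by omega, hge, List.getD_eq_getElem?_getD, hget]
    · simp [pvScan, show k < fcds.length by omega, hge, List.getD_eq_getElem?_getD, hget]
  · -- recursive case: hi - lo ≥ 2
    have h2 : 2 ≤ hi - lo := by omega
    have hmid1 : lo < (lo + hi) / 2 := by omega
    have hmid2 : (lo + hi) / 2 < hi := by omega
    rw [genB_solve, dif_neg (by push Not; exact ⟨by omega, by omega⟩), dif_neg hone]
    show ((genB_solve fcds il lo ((lo + hi) / 2) k).1 ++
            (genB_solve fcds il ((lo + hi) / 2) hi (genB_solve fcds il lo ((lo + hi) / 2) k).2).1,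
          (genB_solve fcds il ((lo + hi) / 2) hi (genB_solve fcds il lo ((lo + hi) / 2) k).2).2) = _
    rw [ih ((lo + hi) / 2 - lo) (by omega) lo ((lo + hi) / 2) k rfl (by omega) (by omega),
        ih (hi - (lo + hi) / 2) (by omega) ((lo + hi) / 2) hi _ rfl (by omega) hhi]
    have hsplit : (il.drop lo).take (hi - lo) =
        (il.drop lo).take ((lo + hi) / 2 - lo) ++ (il.drop ((lo + hi) / 2)).take (hi - (lo + hi) / 2) := by
      have : hi - lo = ((lo + hi) / 2 - lo) + (hi - (lo + hi) / 2) := by omega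
      have hdd : List.drop ((lo + hi) / 2 - lo) (List.drop lo il) = List.drop ((lo + hi) / 2) il := by
        rw [List.drop_drop]
        congr 1
        omega
      rw [this, List.take_add, hdd]
    rw [hsplit, pvScan_append]
    have hlen : ((il.drop lo).take ((lo + hi) / 2 - lo)).length = (lo + hi) / 2 - lo := by
      simp [List.length_take, List.length_drop]
      omega
    have hcast : (lo : Int) + ((il.drop lo).take ((lo + hi) / 2 - lo)).length = (((lo + hi) / 2 : Nat) : Int) := by
      rw [hlen]; push_cast; omega
    rw [hcast]

-- ===== VERDICT (by name: the statement is the Claim_ definition above) =====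
theorem generate_fcd_idxs_spec : Claim_equal_generate_fcd_idxs := by
  intro fcds_list index_list _
  show generate_fcd_idxs fcds_list index_list = generate_fcd_idxs_alt fcds_list index_list
  rw [generate_fcd_idxs, generate_fcd_idxs_alt, genA_loop_eq_scan,
      genB_solve_eq_scan fcds_list index_list (index_list.length - 0) 0 index_list.length 0 rfl (by omega) le_rfl]
  simp
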